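-- pv_equiv track=rewrite | github.com/alexandrengau/Word2Vec_LLM_Project | hw2_word2vec_alexandre_ngau.py | extract_words_contexts
-- ===== SOURCE A (Python) =====
-- R = 4
--
-- def extract_words_contexts(list_of_ids_of_txt_doc, R=R):
--   w_ids = list_of_ids_of_txt_doc
--   c_plus_ids = []
--   for w in range(len(w_ids)) :
--     c_plus = []
--     for r in range(w-R, w+R+1):
--       if r < 0 :
--         c_plus.append(0)
--       if r >= 0 and r < len(w_ids) and r != w:
--         c_plus.append(w_ids[r])
--       if r >= len(w_ids):
--         c_plus.append(0)
--     c_plus_ids.append(c_plus)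
--   return w_ids, c_plus_ids
-- ===== SOURCE B (Python) =====
-- R = 4
--
-- def extract_words_contexts(list_of_ids_of_txt_doc, R=R):
--   w_ids = list_of_ids_of_txt_doc
--   k = max(R, 0)  # a negative radius means an empty window
--   padded = [0] * k + w_ids + [0] * k
--   c_plus_ids = [padded[w:w + k] + padded[w + k + 1:w + 2 * k + 1]
--                 for w in range(len(w_ids))]
--   return w_ids, c_plus_ids
-- ===== Notes on version B (the rewrite author's own statement) =====
-- stated objective: simpler
-- what changed: B replaces A's nested loop with three per-element boundary tests and element-wise appends by building one zero-padded array once and taking two contiguous slices (left and right of the center) per position; a negative radius is clamped to 0, which reproduces A's empty contexts there.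
import Mathlib
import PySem

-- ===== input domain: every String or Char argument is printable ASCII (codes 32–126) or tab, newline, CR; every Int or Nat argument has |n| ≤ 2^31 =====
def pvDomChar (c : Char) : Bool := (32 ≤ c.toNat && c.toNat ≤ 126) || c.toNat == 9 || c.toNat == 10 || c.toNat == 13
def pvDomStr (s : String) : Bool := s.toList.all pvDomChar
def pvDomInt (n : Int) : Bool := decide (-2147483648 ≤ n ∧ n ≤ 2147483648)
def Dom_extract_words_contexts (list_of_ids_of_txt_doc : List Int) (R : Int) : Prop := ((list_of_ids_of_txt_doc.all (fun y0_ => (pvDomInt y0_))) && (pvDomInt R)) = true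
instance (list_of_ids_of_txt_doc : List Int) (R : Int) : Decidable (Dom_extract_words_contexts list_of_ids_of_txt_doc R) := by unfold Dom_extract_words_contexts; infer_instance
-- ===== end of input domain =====

-- B builds one zero-padded array and takes two slices per position instead of A's
-- boundary-tested inner loop; same return value everywhere (objective: simpler).


-- ===== PORT A =====
def extract_words_contexts (list_of_ids_of_txt_doc : List Int) (R : Int) : List Int × List (List Int) :=
  let w_ids := list_of_ids_of_txt_doc
  let c_plus_ids : List (List Int) :=
    (PySem.List.pyRange 0 (w_ids.length : Int) 1).foldl (fun c_plus_ids w =>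
      let c_plus : List Int :=
        (PySem.List.pyRange (w - R) (w + R + 1) 1).foldl (fun c_plus r =>
          let c_plus := if r < 0 then c_plus ++ [(0 : Int)] else c_plus
          let c_plus := if 0 ≤ r ∧ r < (w_ids.length : Int) ∧ r ≠ w then
              c_plus ++ [PySem.List.pyGetD w_ids r 0] else c_plus
          let c_plus := if (w_ids.length : Int) ≤ r then c_plus ++ [(0 : Int)] else c_plus
          c_plus) []
      c_plus_ids ++ [c_plus]) []
  (w_ids, c_plus_ids)

-- ===== PORT B =====
def extract_words_contexts_alt (list_of_ids_of_txt_doc : List Int) (R : Int) : List Int × List (List Int) :=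
  let w_ids := list_of_ids_of_txt_doc
  let k := max R 0
  let padded := List.replicate k.toNat (0 : Int) ++ w_ids ++ List.replicate k.toNat (0 : Int)
  let c_plus_ids :=
    (PySem.List.pyRange 0 (w_ids.length : Int) 1).map (fun w =>
      PySem.List.slice padded (some w) (some (w + k)) ++
      PySem.List.slice padded (some (w + k + 1)) (some (w + 2 * k + 1)))
  (w_ids, c_plus_ids)

-- ===== PRECONDITION & SPEC =====
def Spec_extract_words_contexts (list_of_ids_of_txt_doc : List Int) (R : Int) (out : List Int × List (List Int)) : Prop := out = extract_words_contexts_alt list_of_ids_of_txt_doc R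
instance (list_of_ids_of_txt_doc : List Int) (R : Int) (out : List Int × List (List Int)) : Decidable (Spec_extract_words_contexts list_of_ids_of_txt_doc R out) := by unfold Spec_extract_words_contexts; infer_instance

-- ===== CLAIM (what is proved, stated in full; the proofs are below) =====
def Claim_equal_extract_words_contexts : Prop := ∀ (list_of_ids_of_txt_doc : List Int) (R : Int), Dom_extract_words_contexts list_of_ids_of_txt_doc R → Spec_extract_words_contexts list_of_ids_of_txt_doc R (extract_words_contexts list_of_ids_of_txt_doc R)

-- ===== LEMMAS AND PROOFS =====

-- what A's inner loop appends at offset r (the three disjoint branches, concatenated)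
def pvG (xs : List Int) (w r : Int) : List Int :=
  (if r < 0 then [(0 : Int)] else []) ++
  (if 0 ≤ r ∧ r < (xs.length : Int) ∧ r ≠ w then [PySem.List.pyGetD xs r 0] else []) ++
  (if (xs.length : Int) ≤ r then [(0 : Int)] else [])

-- the value of the padded array at padded index r + k, expressed at offset r
def pvH (xs : List Int) (r : Int) : Int :=
  if r < 0 then 0 else if r < (xs.length : Int) then PySem.List.pyGetD xs r 0 else 0

lemma pvG_body (xs : List Int) (w : Int) (cp : List Int) (r : Int) :
    (let c1 := if r < 0 then cp ++ [(0 : Int)] else cp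
     let c2 := if 0 ≤ r ∧ r < (xs.length : Int) ∧ r ≠ w then
         c1 ++ [PySem.List.pyGetD xs r 0] else c1
     let c3 := if (xs.length : Int) ≤ r then c2 ++ [(0 : Int)] else c2
     c3) = cp ++ pvG xs w r := by
  simp only [pvG]
  split_ifs <;> simp

lemma pvG_singleton (xs : List Int) (w r : Int) (hrw : r ≠ w) : pvG xs w r = [pvH xs r] := by
  simp only [pvG, pvH]
  split_ifs with h1 h2 h3 <;> simp_all <;> omega

lemma flatMap_pvG_eq_map (xs : List Int) (w : Int) (l : List Int) (hl : ∀ r ∈ l, r ≠ w) :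
    l.flatMap (pvG xs w) = l.map (pvH xs) := by
  induction l with
  | nil => simp
  | cons a t ih =>
    simp only [List.flatMap_cons, List.map_cons]
    rw [pvG_singleton xs w a (hl a (by simp)), ih (fun r hr => hl r (by simp [hr]))]
    simp

-- a slice of the k-padded array is the map of pvH over the corresponding offset range
lemma slice_padded (xs : List Int) (k : Int) (hk : 0 ≤ k) (a b : Int)
    (ha : -k ≤ a) (hab : a ≤ b) (hb : b ≤ (xs.length : Int) + k) :
    PySem.List.slice (List.replicate k.toNat (0 : Int) ++ xs ++ List.replicate k.toNat (0 : Int))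
      (some (a + k)) (some (b + k)) = (PySem.List.pyRange a b 1).map (pvH xs) := by
  rw [PySem.List.slice_toNat _ (by omega) (by omega)]
  apply List.ext_getElem
  · simp [PySem.List.length_pyRange_one]
    omega
  · intro j hj1 hj2
    have hjlt : j < (b - a).toNat := by
      simpa [PySem.List.length_pyRange_one] using hj2
    rw [List.getElem_take, List.getElem_drop, List.getElem_map, PySem.List.getElem_pyRange_one]
    simp only [List.getElem_append, List.length_append, List.length_replicate,
      List.getElem_replicate, pvH]
    split_ifs <;>
      first
        | rfl
        | omega
        | (rw [PySem.List.pyGetD_eq_getElem _ _ (by omega) (by omega)]; congr 1; omega)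

-- per-position agreement: A's inner loop equals B's two slices
lemma inner_eq (xs : List Int) (R w : Int) (hw0 : 0 ≤ w) (hwn : w < (xs.length : Int)) :
    (PySem.List.pyRange (w - R) (w + R + 1) 1).foldl (fun c_plus r =>
        let c1 := if r < 0 then c_plus ++ [(0 : Int)] else c_plus
        let c2 := if 0 ≤ r ∧ r < (xs.length : Int) ∧ r ≠ w then
            c1 ++ [PySem.List.pyGetD xs r 0] else c1
        let c3 := if (xs.length : Int) ≤ r then c2 ++ [(0 : Int)] else c2
        c3) [] =
      PySem.List.slice (List.replicate (max R 0).toNat (0 : Int) ++ xs ++ List.replicate (max R 0).toNat (0 : Int))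
        (some w) (some (w + max R 0)) ++
      PySem.List.slice (List.replicate (max R 0).toNat (0 : Int) ++ xs ++ List.replicate (max R 0).toNat (0 : Int))
        (some (w + max R 0 + 1)) (some (w + 2 * max R 0 + 1)) := by
  have hbody : (fun (c_plus : List Int) (r : Int) =>
      let c1 := if r < 0 then c_plus ++ [(0 : Int)] else c_plus
      let c2 := if 0 ≤ r ∧ r < (xs.length : Int) ∧ r ≠ w then
          c1 ++ [PySem.List.pyGetD xs r 0] else c1
      let c3 := if (xs.length : Int) ≤ r then c2 ++ [(0 : Int)] else c2
      c3) = fun c_plus r => c_plus ++ pvG xs w r := by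
    funext cp r; exact pvG_body xs w cp r
  rw [hbody, PySem.List.foldl_append_eq_flatMap]
  rcases Int.lt_or_le R 0 with hR | hR
  · -- negative radius: empty range on the left, empty slices on the right
    have hmax : max R 0 = 0 := by omega
    rw [PySem.List.pyRange_one_eq_nil (by omega)]
    rw [hmax]
    rw [PySem.List.slice_toNat _ (by omega) (by omega),
        PySem.List.slice_toNat _ (by omega) (by omega)]
    simp
  · have hmax : max R 0 = R := by omega
    rw [hmax]
    -- split A's range at the center w
    rw [PySem.List.pyRange_one_append (w - R) w (w + R + 1) (by omega) (by omega),
        PySem.List.pyRange_one_cons (show w < w + R + 1 by omega)]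
    simp only [List.flatMap_append, List.flatMap_cons, List.nil_append]
    have hGw : pvG xs w w = [] := by
      simp only [pvG]
      split_ifs <;> first | rfl | omega
    rw [hGw]
    rw [flatMap_pvG_eq_map xs w _ (fun r hr => by
          have := (PySem.List.mem_pyRange_one).1 hr; omega),
        flatMap_pvG_eq_map xs w _ (fun r hr => by
          have := (PySem.List.mem_pyRange_one).1 hr; omega)]
    have hL := slice_padded xs R hR (w - R) w (by omega) (by omega) (by omega)
    have hRi := slice_padded xs R hR (w + 1) (w + R + 1) (by omega) (by omega) (by omega)
    have e1 : w - R + R = w := by ring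
    have e2 : w + 1 + R = w + R + 1 := by ring
    have e3 : w + R + 1 + R = w + 2 * R + 1 := by ring
    rw [e1] at hL
    rw [e2, e3] at hRi
    rw [hL, hRi]
    simp

-- ===== VERDICT (by name: the statement is the Claim_ definition above) =====
theorem extract_words_contexts_spec : Claim_equal_extract_words_contexts := by
  intro xs R _
  show extract_words_contexts xs R = extract_words_contexts_alt xs R
  unfold extract_words_contexts extract_words_contexts_alt
  simp only []
  refine Prod.ext rfl ?_
  rw [PySem.List.foldl_append_singleton_eq_map]
  apply List.map_congr_left
  intro w hw
  have hwb := (PySem.List.mem_pyRange_one).1 hw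
  exact inner_eq xs R w hwb.1 hwb.2
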